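-- pv_equiv track=rewrite | github.com/MelvinJoshua1375/githubactions-demo | app.py | group_features
-- ===== SOURCE A (Python) =====
-- def group_features(columns):
--     groups = {"mean": [], "se": [], "worst": []}
--     for col in columns:
--         if col.endswith("mean"):
--             groups["mean"].append(col)
--         elif col.endswith("se"):
--             groups["se"].append(col)
--         elif col.endswith("worst"):
--             groups["worst"].append(col)
--         else:
--             groups.setdefault("other", []).append(col)
--     return groups
-- ===== SOURCE B (Python) =====
-- def _rank(c):
--     if c.endswith("mean"):
--         return 0
--     if c.endswith("se"):
--         return 1
--     if c.endswith("worst"):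
--         return 2
--     return 3
--
-- def group_features(columns):
--     # decorate-sort-slice: stable sort by suffix rank keeps the original order
--     # inside each group, then cut the sorted list at the rank boundaries
--     ordered = sorted(columns, key=_rank)
--     ranks = [_rank(c) for c in ordered]
--     b1 = ranks.count(0)
--     b2 = b1 + ranks.count(1)
--     b3 = b2 + ranks.count(2)
--     groups = {"mean": ordered[:b1], "se": ordered[b1:b2], "worst": ordered[b2:b3]}
--     if b3 < len(ordered):
--         groups["other"] = ordered[b3:]
--     return groups
-- ===== Notes on version B (the rewrite author's own statement) =====
-- stated objective: alternative
-- what changed: Replaces A's single branching pass that appends into a mutable dict (if/elif chain plus setdefault) by a decorate-stable-sort-slice algorithm: each column gets a suffix rank 0-3, the list is stably sorted by rank, and the sorted list is cut at the rank-count boundaries into the four groups, 'other' added only when its segment is non-empty.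
import Mathlib
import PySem

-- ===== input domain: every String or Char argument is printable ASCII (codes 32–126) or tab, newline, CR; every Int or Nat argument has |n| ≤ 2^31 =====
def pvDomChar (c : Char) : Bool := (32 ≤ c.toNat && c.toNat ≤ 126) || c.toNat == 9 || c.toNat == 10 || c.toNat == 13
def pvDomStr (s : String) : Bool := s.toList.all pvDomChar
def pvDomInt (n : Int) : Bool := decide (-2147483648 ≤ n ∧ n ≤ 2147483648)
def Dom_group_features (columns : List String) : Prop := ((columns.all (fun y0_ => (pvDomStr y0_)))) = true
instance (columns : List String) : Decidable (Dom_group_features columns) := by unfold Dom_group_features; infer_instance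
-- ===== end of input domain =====

-- B replaces A's single branching pass into a mutable dict (if/elif + setdefault) by a
-- decorate-stable-sort-slice algorithm: rank each column 0-3 by suffix, stably sort by
-- rank, cut at the rank-count boundaries (objective: alternative algorithm).

-- ===== PORT A =====
-- one branching pass, appending into an insertion-ordered dict; setdefault for "other"
def group_features (columns : List String) : List (String × List String) :=
  let groups : PySem.Dict String (List String) :=
    PySem.Dict.mk [("mean", []), ("se", []), ("worst", [])]
  (columns.foldl (fun g col =>
      if PySem.Str.endswith col "mean" then g.modify "mean" [] (· ++ [col])
      else if PySem.Str.endswith col "se" then g.modify "se" [] (· ++ [col])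
      else if PySem.Str.endswith col "worst" then g.modify "worst" [] (· ++ [col])
      else (g.setdefault "other" []).modify "other" [] (· ++ [col]))
    groups).items

-- ===== PORT B =====
-- Source B's _rank: suffix rank 0..3
def pvRank (c : String) : Int :=
  if PySem.Str.endswith c "mean" then 0
  else if PySem.Str.endswith c "se" then 1
  else if PySem.Str.endswith c "worst" then 2
  else 3

-- decorate-stable-sort-slice, step for step from Source B
def group_features_alt (columns : List String) : List (String × List String) :=
  let ordered := PySem.List.sorted columns pvRank
  let ranks := ordered.map pvRank
  let b1 : Int := PySem.List.count ranks 0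
  let b2 : Int := b1 + PySem.List.count ranks 1
  let b3 : Int := b2 + PySem.List.count ranks 2
  let groups := [("mean", PySem.List.slice ordered none (some b1)),
    ("se", PySem.List.slice ordered (some b1) (some b2)),
    ("worst", PySem.List.slice ordered (some b2) (some b3))]
  if b3 < PySem.List.len ordered then groups ++ [("other", PySem.List.slice ordered (some b3) none)]
  else groups

-- ===== PRECONDITION & SPEC =====
def Spec_group_features (columns : List String) (out : List (String × List String)) : Prop := out = group_features_alt columns
instance (columns : List String) (out : List (String × List String)) : Decidable (Spec_group_features columns out) := by unfold Spec_group_features; infer_instance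

-- ===== CLAIM (what is proved, stated in full; the proofs are below) =====
def Claim_equal_group_features : Prop := ∀ (columns : List String), Dom_group_features columns → Spec_group_features columns (group_features columns)

-- ===== LEMMAS AND PROOFS =====

-- the three suffix tests are pairwise exclusive: none of the suffixes is a suffix of another
theorem pvEndsExcl (c : String) (p q : String)
    (hlit : ¬ (p.toList <:+ q.toList) ∧ ¬ (q.toList <:+ p.toList))
    (hp : PySem.Str.endswith c p = true) : PySem.Str.endswith c q = false := by
  by_contra h
  rw [Bool.not_eq_false] at h
  simp only [PySem.Str.endswith_eq, PySem.Chars.endswith_iff] at hp h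
  rcases List.suffix_or_suffix_of_suffix hp h with hs | hs
  · exact hlit.1 hs
  · exact hlit.2 hs

-- A's loop body
def pvStep (g : PySem.Dict String (List String)) (col : String) : PySem.Dict String (List String) :=
  if PySem.Str.endswith col "mean" then g.modify "mean" [] (· ++ [col])
  else if PySem.Str.endswith col "se" then g.modify "se" [] (· ++ [col])
  else if PySem.Str.endswith col "worst" then g.modify "worst" [] (· ++ [col])
  else (g.setdefault "other" []).modify "other" [] (· ++ [col])

-- branch predicates, in A's elif order
def pvIsMean (c : String) : Bool := PySem.Str.endswith c "mean"
def pvIsSe (c : String) : Bool := PySem.Str.endswith c "se"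
def pvIsWorst (c : String) : Bool := PySem.Str.endswith c "worst"
def pvIsOther (c : String) : Bool := !(pvIsMean c || pvIsSe c || pvIsWorst c)

-- invariant for A once the "other" key exists (4-key state)
theorem pvFold4 (cols : List String) : ∀ (m s w o : List String),
    (cols.foldl pvStep (PySem.Dict.mk [("mean", m), ("se", s), ("worst", w), ("other", o)])).items
      = [("mean", m ++ cols.filter pvIsMean), ("se", s ++ cols.filter pvIsSe),
         ("worst", w ++ cols.filter pvIsWorst), ("other", o ++ cols.filter pvIsOther)] := by
  induction cols with
  | nil => intro m s w o; simp
  | cons c cs ih =>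
    intro m s w o
    by_cases h1 : PySem.Str.endswith c "mean" = true
    · have h2 := pvEndsExcl c "mean" "se" (by decide) h1
      have h3 := pvEndsExcl c "mean" "worst" (by decide) h1
      simp only [List.foldl_cons, pvStep, h1,
        PySem.Dict.modify, PySem.Dict.contains, PySem.Dict.get?, PySem.Dict.getD,
        PySem.Dict.insert]
      simp only [List.filter_cons, pvIsMean, pvIsSe, pvIsWorst, pvIsOther, h1, h2, h3]
      simp [ih]
    · by_cases h2 : PySem.Str.endswith c "se" = true
      · have h1' := pvEndsExcl c "se" "mean" (by decide) h2
        have h3 := pvEndsExcl c "se" "worst" (by decide) h2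
        simp only [List.foldl_cons, pvStep, h1, h2,
          PySem.Dict.modify, PySem.Dict.contains, PySem.Dict.get?, PySem.Dict.getD,
          PySem.Dict.insert]
        simp only [List.filter_cons, pvIsMean, pvIsSe, pvIsWorst, pvIsOther, h1, h2, h3]
        simp [ih]
      · by_cases h3 : PySem.Str.endswith c "worst" = true
        · have h1' := pvEndsExcl c "worst" "mean" (by decide) h3
          have h2' := pvEndsExcl c "worst" "se" (by decide) h3
          simp only [List.foldl_cons, pvStep, h1, h2, h3,
            PySem.Dict.modify, PySem.Dict.contains, PySem.Dict.get?, PySem.Dict.getD,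
            PySem.Dict.insert]
          simp only [List.filter_cons, pvIsMean, pvIsSe, pvIsWorst, pvIsOther, h1, h2, h3]
          simp [ih]
        · simp only [List.foldl_cons, pvStep, h1, h2, h3,
            PySem.Dict.setdefault, PySem.Dict.modify, PySem.Dict.contains, PySem.Dict.get?,
            PySem.Dict.getD, PySem.Dict.insert]
          simp only [List.filter_cons, pvIsMean, pvIsSe, pvIsWorst, pvIsOther, h1, h2, h3]
          simp [ih]

-- invariant for A's initial 3-key state
theorem pvFold3 (cols : List String) : ∀ (m s w : List String),
    (cols.foldl pvStep (PySem.Dict.mk [("mean", m), ("se", s), ("worst", w)])).items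
      = [("mean", m ++ cols.filter pvIsMean), ("se", s ++ cols.filter pvIsSe),
         ("worst", w ++ cols.filter pvIsWorst)] ++
        (if (cols.filter pvIsOther).isEmpty then [] else [("other", cols.filter pvIsOther)]) := by
  induction cols with
  | nil => intro m s w; simp
  | cons c cs ih =>
    intro m s w
    by_cases h1 : PySem.Str.endswith c "mean" = true
    · have h2 := pvEndsExcl c "mean" "se" (by decide) h1
      have h3 := pvEndsExcl c "mean" "worst" (by decide) h1
      simp only [List.foldl_cons, pvStep, h1,
        PySem.Dict.modify, PySem.Dict.contains, PySem.Dict.get?, PySem.Dict.getD,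
        PySem.Dict.insert]
      simp only [List.filter_cons, pvIsMean, pvIsSe, pvIsWorst, pvIsOther, h1, h2, h3]
      simp [ih]
    · by_cases h2 : PySem.Str.endswith c "se" = true
      · have h1' := pvEndsExcl c "se" "mean" (by decide) h2
        have h3 := pvEndsExcl c "se" "worst" (by decide) h2
        simp only [List.foldl_cons, pvStep, h1, h2,
          PySem.Dict.modify, PySem.Dict.contains, PySem.Dict.get?, PySem.Dict.getD,
          PySem.Dict.insert]
        simp only [List.filter_cons, pvIsMean, pvIsSe, pvIsWorst, pvIsOther, h1, h2, h3]
        simp [ih]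
      · by_cases h3 : PySem.Str.endswith c "worst" = true
        · have h1' := pvEndsExcl c "worst" "mean" (by decide) h3
          have h2' := pvEndsExcl c "worst" "se" (by decide) h3
          simp only [List.foldl_cons, pvStep, h1, h2, h3,
            PySem.Dict.modify, PySem.Dict.contains, PySem.Dict.get?, PySem.Dict.getD,
            PySem.Dict.insert]
          simp only [List.filter_cons, pvIsMean, pvIsSe, pvIsWorst, pvIsOther, h1, h2, h3]
          simp [ih]
        · simp only [List.foldl_cons, pvStep, h1, h2, h3,
            PySem.Dict.setdefault, PySem.Dict.modify, PySem.Dict.contains, PySem.Dict.get?,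
            PySem.Dict.getD, PySem.Dict.insert]
          simp only [List.filter_cons, pvIsMean, pvIsSe, pvIsWorst, pvIsOther, h1, h2, h3]
          simp [pvFold4]

-- category facts about the rank
theorem pvRank_mean (c : String) (h : pvIsMean c = true) : pvRank c = 0 := by
  simp [pvRank, pvIsMean] at *; simp [h]
theorem pvRank_se (c : String) (h : pvIsSe c = true) : pvRank c = 1 := by
  have h1 := pvEndsExcl c "se" "mean" (by decide) h
  simp [pvRank, pvIsSe] at *; simp [h, h1]
theorem pvRank_worst (c : String) (h : pvIsWorst c = true) : pvRank c = 2 := by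
  have h1 := pvEndsExcl c "worst" "mean" (by decide) h
  have h2 := pvEndsExcl c "worst" "se" (by decide) h
  simp [pvRank, pvIsWorst] at *; simp [h, h1, h2]
theorem pvRank_other (c : String) (h : pvIsOther c = true) : pvRank c = 3 := by
  simp [pvIsOther, pvIsMean, pvIsSe, pvIsWorst] at h
  obtain ⟨⟨hm, hs⟩, hw⟩ := h
  simp [pvRank, hm, hs, hw]

-- insertBy's cons equation
theorem pvInsCons {α : Type} (blt : α → α → Bool) (x a : α) (t : List α) :
    PySem.List.insertBy blt x (a :: t)
      = if blt x a then x :: a :: t else a :: PySem.List.insertBy blt x t := by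
  cases hb : blt x a <;> simp [PySem.List.insertBy, hb]

-- insertBy passes over elements it is not before
theorem pvInsSkip {α : Type} (blt : α → α → Bool) (x : α) (l1 l2 : List α)
    (h : ∀ y ∈ l1, blt x y = false) :
    PySem.List.insertBy blt x (l1 ++ l2) = l1 ++ PySem.List.insertBy blt x l2 := by
  induction l1 with
  | nil => simp
  | cons a l ih =>
    have ha := h a (by simp)
    have ih' := ih (fun y hy => h y (by simp [hy]))
    simp only [List.cons_append, pvInsCons, ha]
    simp [ih']

-- insertBy stops in front of a block it is before
theorem pvInsFront {α : Type} (blt : α → α → Bool) (x : α) (l : List α)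
    (h : ∀ y ∈ l, blt x y = true) :
    PySem.List.insertBy blt x l = x :: l := by
  cases l with
  | nil => simp [PySem.List.insertBy]
  | cons a t => simp [pvInsCons, h a (by simp)]

-- the four rank segments of a list, in rank order
def pvSeg (p : List String) : List String :=
  p.filter pvIsMean ++ p.filter pvIsSe ++ p.filter pvIsWorst ++ p.filter pvIsOther

-- stable insertion sort by rank builds exactly the four segments
theorem pvFoldIns (cols : List String) : ∀ p : List String,
    cols.foldl (fun acc x => PySem.List.insertBy (fun a b => decide (pvRank a < pvRank b)) x acc)
      (pvSeg p) = pvSeg (p ++ cols) := by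
  induction cols with
  | nil => intro p; simp
  | cons c cs ih =>
    intro p
    have hstep : PySem.List.insertBy (fun a b => decide (pvRank a < pvRank b)) c (pvSeg p)
        = pvSeg (p ++ [c]) := by
      by_cases h1 : pvIsMean c = true
      · have hc := pvRank_mean c h1
        rw [pvSeg, show p.filter pvIsMean ++ p.filter pvIsSe ++ p.filter pvIsWorst ++ p.filter pvIsOther
            = p.filter pvIsMean ++ (p.filter pvIsSe ++ p.filter pvIsWorst ++ p.filter pvIsOther) by simp,
          pvInsSkip _ _ (p.filter pvIsMean) _
            (fun y hy => by simp [hc, pvRank_mean y (List.mem_filter.mp hy).2]),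
          pvInsFront _ _ _ (fun y hy => by
            simp only [List.mem_append, List.mem_filter] at hy
            rcases hy with (⟨_, hy⟩ | ⟨_, hy⟩) | ⟨_, hy⟩
            · simp [hc, pvRank_se y hy]
            · simp [hc, pvRank_worst y hy]
            · simp [hc, pvRank_other y hy])]
        have h2 : pvIsSe c = false := pvEndsExcl c "mean" "se" (by decide) h1
        have h3 : pvIsWorst c = false := pvEndsExcl c "mean" "worst" (by decide) h1
        simp [pvSeg, List.filter_append, h1, h2, h3, pvIsOther]
      · by_cases h2 : pvIsSe c = true
        · have hc := pvRank_se c h2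
          have h1' : pvIsMean c = false := pvEndsExcl c "se" "mean" (by decide) h2
          have h3 : pvIsWorst c = false := pvEndsExcl c "se" "worst" (by decide) h2
          rw [pvSeg, show p.filter pvIsMean ++ p.filter pvIsSe ++ p.filter pvIsWorst ++ p.filter pvIsOther
              = (p.filter pvIsMean ++ p.filter pvIsSe) ++ (p.filter pvIsWorst ++ p.filter pvIsOther) by simp,
            pvInsSkip _ _ _ _ (fun y hy => by
              simp only [List.mem_append, List.mem_filter] at hy
              rcases hy with ⟨_, hy⟩ | ⟨_, hy⟩
              · simp [hc, pvRank_mean y hy]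
              · simp [hc, pvRank_se y hy]),
            pvInsFront _ _ _ (fun y hy => by
              simp only [List.mem_append, List.mem_filter] at hy
              rcases hy with ⟨_, hy⟩ | ⟨_, hy⟩
              · simp [hc, pvRank_worst y hy]
              · simp [hc, pvRank_other y hy])]
          simp [pvSeg, List.filter_append, h1', h2, h3, pvIsOther]
        · by_cases h3 : pvIsWorst c = true
          · have hc := pvRank_worst c h3
            have h1' : pvIsMean c = false := pvEndsExcl c "worst" "mean" (by decide) h3
            have h2' : pvIsSe c = false := pvEndsExcl c "worst" "se" (by decide) h3
            rw [pvSeg, show p.filter pvIsMean ++ p.filter pvIsSe ++ p.filter pvIsWorst ++ p.filter pvIsOther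
                = (p.filter pvIsMean ++ p.filter pvIsSe ++ p.filter pvIsWorst) ++ p.filter pvIsOther by simp,
              pvInsSkip _ _ _ _ (fun y hy => by
                simp only [List.mem_append, List.mem_filter] at hy
                rcases hy with (⟨_, hy⟩ | ⟨_, hy⟩) | ⟨_, hy⟩
                · simp [hc, pvRank_mean y hy]
                · simp [hc, pvRank_se y hy]
                · simp [hc, pvRank_worst y hy]),
              pvInsFront _ _ _ (fun y hy => by
                have hy' := (List.mem_filter.mp hy).2
                simp [hc, pvRank_other y hy'])]
            simp [pvSeg, List.filter_append, h1', h2', h3, pvIsOther]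
          · have ho : pvIsOther c = true := by
              simp [pvIsOther, pvIsMean, pvIsSe, pvIsWorst] at *
              exact ⟨⟨h1, h2⟩, h3⟩
            have hc := pvRank_other c ho
            rw [pvSeg, show p.filter pvIsMean ++ p.filter pvIsSe ++ p.filter pvIsWorst ++ p.filter pvIsOther
                = (p.filter pvIsMean ++ p.filter pvIsSe ++ p.filter pvIsWorst ++ p.filter pvIsOther) ++ [] by simp,
              pvInsSkip _ _ _ _ (fun y hy => by
                simp only [List.mem_append, List.mem_filter] at hy
                rcases hy with ((⟨_, hy⟩ | ⟨_, hy⟩) | ⟨_, hy⟩) | ⟨_, hy⟩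
                · simp [hc, pvRank_mean y hy]
                · simp [hc, pvRank_se y hy]
                · simp [hc, pvRank_worst y hy]
                · simp [hc, pvRank_other y hy])]
            simp only [Bool.not_eq_true] at h1 h2 h3
            simp [pvSeg, List.filter_append, PySem.List.insertBy, h1, h2, h3, ho]
    rw [List.foldl_cons, hstep, ih (p ++ [c]), List.append_assoc]
    simp

-- sorted(columns, key=_rank) is exactly the four segments in order
theorem pvSortedEq (cols : List String) : PySem.List.sorted cols pvRank = pvSeg cols := by
  rw [PySem.List.sorted_eq_foldl_insertBy]
  have h := pvFoldIns cols []
  simpa [pvSeg] using h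

-- each segment maps to a constant rank
theorem pvMapRank (cols : List String) (q : String → Bool) (r : Int)
    (hq : ∀ c, q c = true → pvRank c = r) :
    (cols.filter q).map pvRank = List.replicate (cols.filter q).length r := by
  have h : ∀ b ∈ (cols.filter q).map pvRank, b = r := by
    intro b hb
    obtain ⟨y, hy, rfl⟩ := List.mem_map.mp hb
    exact hq y (List.mem_filter.mp hy).2
  have := List.eq_replicate_of_mem h
  simpa using this

-- group_features_alt in closed form
theorem pvAltEq (cols : List String) :
    group_features_alt cols
      = [("mean", cols.filter pvIsMean), ("se", cols.filter pvIsSe),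
         ("worst", cols.filter pvIsWorst)] ++
        (if (cols.filter pvIsOther).isEmpty then [] else [("other", cols.filter pvIsOther)]) := by
  have hm := pvMapRank cols pvIsMean 0 (pvRank_mean)
  have hs := pvMapRank cols pvIsSe 1 (pvRank_se)
  have hw := pvMapRank cols pvIsWorst 2 (pvRank_worst)
  have hoo := pvMapRank cols pvIsOther 3 (pvRank_other)
  set n0 := (cols.filter pvIsMean).length with hn0
  set n1 := (cols.filter pvIsSe).length with hn1
  set n2 := (cols.filter pvIsWorst).length with hn2
  set n3 := (cols.filter pvIsOther).length with hn3
  have hcnt0 : PySem.List.count ((pvSeg cols).map pvRank) 0 = n0 := by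
    simp [pvSeg, hm, hs, hw, hoo, PySem.List.count_eq, List.count_append, List.count_replicate]
  have hcnt1 : PySem.List.count ((pvSeg cols).map pvRank) 1 = n1 := by
    simp [pvSeg, hm, hs, hw, hoo, PySem.List.count_eq, List.count_append, List.count_replicate]
  have hcnt2 : PySem.List.count ((pvSeg cols).map pvRank) 2 = n2 := by
    simp [pvSeg, hm, hs, hw, hoo, PySem.List.count_eq, List.count_append, List.count_replicate]
  have hsl1 : PySem.List.slice (pvSeg cols) none (some (n0 : Int)) = cols.filter pvIsMean := by
    rw [PySem.List.slice_to_natCast]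
    simp only [pvSeg, List.append_assoc]
    rw [hn0, List.take_left]
  have hsl2 : PySem.List.slice (pvSeg cols) (some (n0 : Int)) (some ((n0 : Int) + (n1 : Int)))
      = cols.filter pvIsSe := by
    rw [show ((n0 : Int) + (n1 : Int)) = (((n0 + n1 : Nat)) : Int) by push_cast; ring,
      PySem.List.slice_natCast, show n0 + n1 - n0 = n1 from by omega]
    simp only [pvSeg, List.append_assoc]
    rw [hn0, List.drop_left, hn1, List.take_left]
  have hsl3 : PySem.List.slice (pvSeg cols) (some ((n0 : Int) + (n1 : Int)))
      (some ((n0 : Int) + (n1 : Int) + (n2 : Int))) = cols.filter pvIsWorst := by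
    rw [show ((n0 : Int) + (n1 : Int)) = (((n0 + n1 : Nat)) : Int) by push_cast; ring,
      show (((n0 + n1 : Nat) : Int) + (n2 : Int)) = (((n0 + n1 + n2 : Nat)) : Int) by push_cast; ring,
      PySem.List.slice_natCast, show n0 + n1 + n2 - (n0 + n1) = n2 from by omega,
      show pvSeg cols = (cols.filter pvIsMean ++ cols.filter pvIsSe)
        ++ (cols.filter pvIsWorst ++ cols.filter pvIsOther) from by simp [pvSeg],
      show n0 + n1 = (cols.filter pvIsMean ++ cols.filter pvIsSe).length from by
        simp [hn0, hn1],
      List.drop_left, hn2, List.take_left]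
  have hsl4 : PySem.List.slice (pvSeg cols) (some ((n0 : Int) + (n1 : Int) + (n2 : Int))) none
      = cols.filter pvIsOther := by
    rw [show ((n0 : Int) + (n1 : Int) + (n2 : Int)) = (((n0 + n1 + n2 : Nat)) : Int) by push_cast; ring,
      PySem.List.slice_from_natCast,
      show pvSeg cols = (cols.filter pvIsMean ++ cols.filter pvIsSe ++ cols.filter pvIsWorst)
        ++ cols.filter pvIsOther from by simp [pvSeg],
      show n0 + n1 + n2 = (cols.filter pvIsMean ++ cols.filter pvIsSe ++ cols.filter pvIsWorst).length from by
        simp [hn0, hn1, hn2, Nat.add_assoc],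
      List.drop_left]
  have hlen : PySem.List.len (pvSeg cols) = ((n0 + n1 + n2 + n3 : Nat) : Int) := by
    simp only [PySem.List.len, pvSeg, List.length_append]
    rw [← hn0, ← hn1, ← hn2, ← hn3]
  simp only [group_features_alt, pvSortedEq, hcnt0, hcnt1, hcnt2, hsl1, hsl2, hsl3, hsl4, hlen]
  by_cases ho : (cols.filter pvIsOther).isEmpty
  · have h30 : n3 = 0 := by
      rw [hn3]; simpa [List.isEmpty_iff, List.length_eq_zero_iff] using ho
    rw [if_neg (by push_cast; omega)]
    simp [ho]
  · have h3p : 0 < n3 := by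
      rcases Nat.eq_zero_or_pos n3 with h | h
      · exfalso; rw [hn3, List.length_eq_zero_iff] at h; simp [h] at ho
      · exact h
    rw [if_pos (by push_cast; omega)]
    simp [ho]

-- ===== VERDICT (by name: the statement is the Claim_ definition above) =====
theorem group_features_spec : Claim_equal_group_features := by
  intro columns _
  unfold Spec_group_features
  have h : group_features columns
      = (columns.foldl pvStep (PySem.Dict.mk [("mean", []), ("se", []), ("worst", [])])).items := rfl
  rw [h, pvFold3, pvAltEq]
  simp
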